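-- pv_equiv track=rewrite | github.com/Buitragox/BattleshipGame | main/functions.py | checkDisparo
-- ===== SOURCE A (Python) =====
-- def checkDisparo(x, y, flota):
--     hit = ""
--     for barco in flota:
--         for coordenada in flota[barco][0]:
--             xBarco = coordenada[0]
--             yBarco = coordenada[1]
--             if x == xBarco and y == yBarco:
--                 hit = barco
--                 break
--         if hit != "":
--             break
--     return hit
-- ===== SOURCE B (Python) =====
-- def checkDisparo(x, y, flota):
--     index = {}
--     for barco in flota:
--         for coordenada in flota[barco][0]:
--             key = (coordenada[0], coordenada[1])
--             if key not in index:
--                 index[key] = barco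
--     return index.get((x, y), "")
-- ===== Notes on version B (the rewrite author's own statement) =====
-- stated objective: alternative
-- what changed: Replaces the nested early-break search with a single precomputed coordinate-to-ship index (insert-if-absent preserves first-match) followed by one dictionary lookup; Pre_ excludes fleets with a ship named the empty string, where A's no-hit sentinel collides with the name and reporting either overlapping ship is defensible.
-- outside the precondition, e.g. on checkDisparo(0, 0, {'': [[(0, 0)]], 's': [[(0, 0)]]}): A returns 's', B returns ''
import Mathlib
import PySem

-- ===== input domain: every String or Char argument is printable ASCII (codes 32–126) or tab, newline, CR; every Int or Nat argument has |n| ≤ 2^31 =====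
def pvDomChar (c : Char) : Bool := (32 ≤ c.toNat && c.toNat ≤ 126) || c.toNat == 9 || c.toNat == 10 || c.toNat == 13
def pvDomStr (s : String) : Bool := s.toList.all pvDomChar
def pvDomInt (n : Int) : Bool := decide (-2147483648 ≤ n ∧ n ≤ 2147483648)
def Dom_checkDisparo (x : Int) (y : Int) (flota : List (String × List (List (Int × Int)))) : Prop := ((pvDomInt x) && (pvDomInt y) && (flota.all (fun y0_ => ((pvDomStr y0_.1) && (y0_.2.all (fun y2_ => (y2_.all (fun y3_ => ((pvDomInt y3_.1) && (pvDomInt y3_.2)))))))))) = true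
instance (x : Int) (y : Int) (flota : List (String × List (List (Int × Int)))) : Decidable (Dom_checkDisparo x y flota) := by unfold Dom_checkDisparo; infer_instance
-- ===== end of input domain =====

-- B replaces A's nested early-break search with a precomputed coordinate→ship index
-- (insert-if-absent, so the first ship wins) followed by one lookup: an alternative
-- decomposition of the same cost.

-- ===== PORT A =====
-- inner loop: scans the ship's first coordinate list; sets hit = barco and breaks at the first match
def checkDisparoInner (x : Int) (y : Int) (barco : String) : List (Int × Int) → String
  | [] => ""
  | c :: rest => if x = c.1 ∧ y = c.2 then barco else checkDisparoInner x y barco rest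

-- outer loop over the dict's keys; under Pre_ the keys are unique (a Python dict), so
-- flota[barco] is exactly the value paired with barco in the association list.
def checkDisparoLoop (x : Int) (y : Int) : List (String × List (List (Int × Int))) → String
  | [] => ""
  | (barco, val) :: rest =>
    let coords := (PySem.List.pyGet? val 0).getD []   -- flota[barco][0]; Pre_ excludes the IndexError case
    let hit := checkDisparoInner x y barco coords
    if hit ≠ "" then hit else checkDisparoLoop x y rest

def checkDisparo (x : Int) (y : Int) (flota : List (String × List (List (Int × Int)))) : String :=
  checkDisparoLoop x y flota

-- ===== PORT B =====
-- build the index: for each ship, for each coordinate of its first list, insert (coord → ship) if absent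
def checkDisparoIndex (flota : List (String × List (List (Int × Int)))) : PySem.Dict (Int × Int) String :=
  flota.foldl (fun d p =>
    ((PySem.List.pyGet? p.2 0).getD []).foldl (fun d c =>
      if d.contains (c.1, c.2) then d else d.insert (c.1, c.2) p.1) d) PySem.Dict.empty

def checkDisparo_alt (x : Int) (y : Int) (flota : List (String × List (List (Int × Int)))) : String :=
  (checkDisparoIndex flota).getD (x, y) ""

-- ===== PRECONDITION & SPEC =====
-- Pre_ requires: unique keys (the list stands for a Python dict, which cannot hold duplicate
-- keys); every ship's list-of-lists nonempty (on an empty one flota[barco][0] raises IndexError);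
-- and no ship named "" — "" is also A's no-hit-yet sentinel, so when a ""-named ship overlaps
-- another ship A reports the later ship and B the first: a corner no caller would specify
-- either way (which of two overlapping ships "occupies" a cell is unspecified in this game).
def Pre_checkDisparo (x : Int) (y : Int) (flota : List (String × List (List (Int × Int)))) : Prop :=
  (flota.map Prod.fst).Nodup ∧ ∀ p ∈ flota, p.1 ≠ "" ∧ 0 < p.2.length
instance (x : Int) (y : Int) (flota : List (String × List (List (Int × Int)))) : Decidable (Pre_checkDisparo x y flota) := by unfold Pre_checkDisparo; infer_instance

def pvWitness_checkDisparo : Int × Int × (List (String × List (List (Int × Int)))) :=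
  (1, 2, [("B", [[(1, 2), (1, 3)]]), ("C", [[(5, 5)]])])

def Spec_checkDisparo (x : Int) (y : Int) (flota : List (String × List (List (Int × Int)))) (out : String) : Prop := out = checkDisparo_alt x y flota
instance (x : Int) (y : Int) (flota : List (String × List (List (Int × Int)))) (out : String) : Decidable (Spec_checkDisparo x y flota out) := by unfold Spec_checkDisparo; infer_instance

-- ===== CLAIM (what is proved, stated in full; the proofs are below) =====
def Claim_equal_checkDisparo : Prop := ∀ (x : Int) (y : Int) (flota : List (String × List (List (Int × Int)))), Dom_checkDisparo x y flota → Pre_checkDisparo x y flota → Spec_checkDisparo x y flota (checkDisparo x y flota)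

-- ===== LEMMAS AND PROOFS =====

-- does the coordinate list cover the shot?
def pvCover (x y : Int) (coords : List (Int × Int)) : Bool :=
  coords.any (fun c => x == c.1 && y == c.2)

-- the first ship (in iteration order) whose first coordinate list covers the shot
def pvFirst (x y : Int) : List (String × List (List (Int × Int))) → Option String
  | [] => none
  | (b, v) :: rest =>
      if pvCover x y ((PySem.List.pyGet? v 0).getD []) then some b else pvFirst x y rest

theorem inner_eq_cover (x y : Int) (barco : String) (coords : List (Int × Int)) :
    checkDisparoInner x y barco coords = if pvCover x y coords then barco else "" := by
  induction coords with
  | nil => simp [checkDisparoInner, pvCover]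
  | cons c rest ih =>
      simp only [checkDisparoInner, pvCover, List.any_cons]
      by_cases h : x = c.1 ∧ y = c.2
      · simp [h]
      · have hb : (x == c.1 && y == c.2) = false := by
          rcases Decidable.not_and_iff_not_or_not.mp h with h1 | h1 <;> simp [h1]
        simp [h, hb, ih, pvCover]

theorem index_inner_get? (x y : Int) (barco : String) (coords : List (Int × Int))
    (d : PySem.Dict (Int × Int) String) :
    (coords.foldl (fun d c =>
        if d.contains (c.1, c.2) then d else d.insert (c.1, c.2) barco) d).get? (x, y)
      = ((d.get? (x, y)).or (if pvCover x y coords then some barco else none)) := by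
  induction coords generalizing d with
  | nil => simp [pvCover]
  | cons c rest ih =>
      simp only [List.foldl_cons, ih, pvCover, List.any_cons]
      by_cases hk : (x, y) = (c.1, c.2)
      · have hb : (x == c.1 && y == c.2) = true := by
          simp [Prod.ext_iff] at hk; simp [hk]
        by_cases hc : d.contains (c.1, c.2)
        · have hco := PySem.Dict.contains_eq_isSome_get? (d := d) (k := (c.1, c.2))
          rw [hc] at hco
          rcases Option.isSome_iff_exists.mp hco.symm with ⟨v, hv⟩
          rw [← hk] at hv
          simp [hc, hv, hb]
        · have hcf : d.contains (c.1, c.2) = false := eq_false_of_ne_true hc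
          have hd : d.get? (x, y) = none := by
            have hco := PySem.Dict.contains_eq_isSome_get? (d := d) (k := (c.1, c.2))
            rw [hcf] at hco
            rw [hk]; exact Option.not_isSome_iff_eq_none.mp (by simp [← hco])
          rw [hcf]
          simp only [Bool.false_eq_true, if_false]
          rw [hk, PySem.Dict.get?_insert_self]
          rw [hk, Prod.mk.eta] at hd
          simp [hd, hb]
      · have hb : (x == c.1 && y == c.2) = false := by
          by_cases h1 : x = c.1
          · have h2 : y ≠ c.2 := fun h2 => hk (by simp [Prod.ext_iff, h1, h2])
            simp [h2]
          · simp [h1]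
        by_cases hc : d.contains (c.1, c.2)
        · simp [hc, hb]
        · have hcf : d.contains (c.1, c.2) = false := eq_false_of_ne_true hc
          rw [hcf]
          simp only [Bool.false_eq_true, if_false]
          rw [PySem.Dict.get?_insert_of_ne (d := d) (v := barco) hk]
          simp [hb, pvCover]

theorem index_get? (x y : Int) (flota : List (String × List (List (Int × Int))))
    (d : PySem.Dict (Int × Int) String) :
    (flota.foldl (fun d p =>
        ((PySem.List.pyGet? p.2 0).getD []).foldl (fun d c =>
          if d.contains (c.1, c.2) then d else d.insert (c.1, c.2) p.1) d) d).get? (x, y)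
      = (d.get? (x, y)).or (pvFirst x y flota) := by
  induction flota generalizing d with
  | nil => simp [pvFirst]
  | cons p rest ih =>
      simp only [List.foldl_cons, ih, index_inner_get?, pvFirst]
      by_cases h : pvCover x y ((PySem.List.pyGet? p.2 0).getD [])
      · simp [h]
      · simp [h]

theorem loopA_eq_first (x y : Int) (flota : List (String × List (List (Int × Int))))
    (hkeys : ∀ p ∈ flota, p.1 ≠ "") :
    checkDisparoLoop x y flota = (pvFirst x y flota).getD "" := by
  induction flota with
  | nil => simp [checkDisparoLoop, pvFirst]
  | cons p rest ih =>
      obtain ⟨b, v⟩ := p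
      have hb : b ≠ "" := hkeys (b, v) List.mem_cons_self
      simp only [checkDisparoLoop, pvFirst, inner_eq_cover]
      by_cases h : pvCover x y ((PySem.List.pyGet? v 0).getD [])
      · simp [h, hb]
      · simp [h, ih (fun q hq => hkeys q (List.mem_cons_of_mem _ hq))]

-- ===== VERDICT (by name: the statement is the Claim_ definition above) =====
theorem checkDisparo_spec : Claim_equal_checkDisparo := by
  intro x y flota _ hpre
  unfold Spec_checkDisparo checkDisparo checkDisparo_alt checkDisparoIndex
  rw [loopA_eq_first x y flota (fun p hp => (hpre.2 p hp).1)]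
  rw [PySem.Dict.getD_eq_get?_getD, index_get?]
  simp
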